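-- pv_equiv track=rewrite | github.com/beehaa/logic | negabinary.py | negabase
-- ===== SOURCE A (Python) =====
-- def negabase(number, base):
--     """ Calculates the decimal value of a number
--         in a given negative base """
--     hbase = 1
--     sign = 1
--     result = 0
--     while number>0:
--         digit = number % 10
--         result += sign*hbase*digit
--         number = int(number / 10)
--         sign = -1*sign
--         hbase *= base
--     return result
-- ===== SOURCE B (Python) =====
-- def negabase(number, base):
--     """ Calculates the decimal value of a number
--         in a given negative base """
--     digits = []
--     while number > 0:
--         digits.append(number % 10)
--         number //= 10
--     result = 0
--     for d in reversed(digits):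
--         result = result * (-base) + d
--     return result
-- ===== Notes on version B (the rewrite author's own statement) =====
-- stated objective: alternative
-- what changed: B first collects the decimal digits in a list, then evaluates them back-to-front with Horner's rule over radix -base, keeping a single accumulator instead of A's sign and running-power variables.
import Mathlib
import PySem

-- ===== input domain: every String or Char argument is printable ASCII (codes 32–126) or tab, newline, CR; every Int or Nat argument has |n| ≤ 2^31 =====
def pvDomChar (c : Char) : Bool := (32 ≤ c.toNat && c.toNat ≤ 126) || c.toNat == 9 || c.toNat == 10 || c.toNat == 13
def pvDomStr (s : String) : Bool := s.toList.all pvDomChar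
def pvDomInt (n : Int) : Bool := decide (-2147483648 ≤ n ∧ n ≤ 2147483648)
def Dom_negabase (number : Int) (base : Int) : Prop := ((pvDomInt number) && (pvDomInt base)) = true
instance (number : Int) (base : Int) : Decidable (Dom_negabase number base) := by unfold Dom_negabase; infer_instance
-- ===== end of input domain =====

-- B evaluates the digits via Horner's rule over radix -base instead of A's sign/power accumulators (alternative decomposition; return-value equivalence).
-- ===== PORT A =====
-- while number>0 loop; `int(number/10)` is truncating division, exact on Dom (|number| ≤ 2^31 fits a float), so ported as Lean's Int `/` (t-division); `%` matches Python for number>0.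
def negabaseLoopA (number base hbase sign result : Int) : Int :=
  if number > 0 then
    negabaseLoopA (number / 10) base (hbase * base) (-1 * sign)
      (result + sign * hbase * (number % 10))
  else result
termination_by number.toNat
decreasing_by omega

def negabase (number : Int) (base : Int) : Int :=
  negabaseLoopA number base 1 1 0

-- ===== PORT B =====
-- digit-extraction loop (number % 10; number //= 10), then Horner over reversed(digits)
def digitsB (number : Int) : List Int :=
  if number > 0 then (number % 10) :: digitsB (number / 10) else []
termination_by number.toNat
decreasing_by omega

def negabase_alt (number : Int) (base : Int) : Int :=
  (digitsB number).reverse.foldl (fun r d => r * (-base) + d) 0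

-- ===== PRECONDITION & SPEC =====
def Spec_negabase (number : Int) (base : Int) (out : Int) : Prop := out = negabase_alt number base
instance (number : Int) (base : Int) (out : Int) : Decidable (Spec_negabase number base out) := by unfold Spec_negabase; infer_instance

-- ===== CLAIM (what is proved, stated in full; the proofs are below) =====
def Claim_equal_negabase : Prop := ∀ (number : Int) (base : Int), Dom_negabase number base → Spec_negabase number base (negabase number base)

-- ===== LEMMAS AND PROOFS =====

-- ===== VERDICT (by name: the statement is the Claim_ definition above) =====
theorem loopA_eq (base : Int) : ∀ (fuel : Nat) (n h s r : Int), n.toNat ≤ fuel →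
    negabaseLoopA n base h s r
      = r + s * h * (digitsB n).foldr (fun d acc => acc * (-base) + d) 0 := by
  intro fuel
  induction fuel with
  | zero =>
    intro n h s r hn
    rw [negabaseLoopA, digitsB]
    have : ¬ n > 0 := by omega
    simp [this]
  | succ k ih =>
    intro n h s r hn
    rw [negabaseLoopA, digitsB]
    by_cases hpos : n > 0
    · simp only [if_pos hpos]
      rw [ih (n / 10) _ _ _ (by omega)]
      simp [List.foldr]
      ring
    · simp [hpos]

theorem negabase_spec : Claim_equal_negabase := by
  intro number base _
  show negabase number base = negabase_alt number base
  rw [negabase, negabase_alt, List.foldl_reverse,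
    loopA_eq base number.toNat number 1 1 0 le_rfl]
  simp only [one_mul, zero_add]
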